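-- pv_equiv track=rewrite | github.com/CarterCobb/cryptik | algorithms/rsa.py | _get_blocks_from_text
-- ===== SOURCE A (Python) =====
-- def _get_blocks_from_text(message, block_size, byte_size):
--     bytes = message.encode('ascii')
--     block_ints = []
--     for block_s in range(0, len(bytes), block_size):
--         block_int = 0
--         for i in range(block_s, min(block_s + block_size, len(bytes))):
--             block_int += bytes[i] * (byte_size ** (i % block_size))
--         block_ints.append(block_int)
--     return block_ints
-- ===== SOURCE B (Python) =====
-- def _block_val(chunk, byte_size):
--     # value of chunk as little-endian digits in base byte_size, by divide and conquer
--     n = len(chunk)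
--     if n == 0:
--         return 0
--     if n == 1:
--         return chunk[0]
--     mid = n // 2
--     return _block_val(chunk[:mid], byte_size) + byte_size ** mid * _block_val(chunk[mid:], byte_size)
--
--
-- def _get_blocks_from_text(message, block_size, byte_size):
--     data = memoryview(message.encode('ascii'))
--     if block_size <= 0:
--         return []
--     blocks = []
--     while len(data):
--         blocks.append(_block_val(data[:block_size], byte_size))
--         data = data[block_size:]
--     return blocks
-- ===== Notes on version B (the rewrite author's own statement) =====
-- stated objective: faster
-- what changed: Replaces the index loop that recomputes byte_size ** (i % block_size) for every byte with a memoryview while-loop that slices off one chunk at a time and evaluates it by divide-and-conquer (split chunk in half, combine with one fast power), instead of A's per-byte exponentiation.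
import Mathlib
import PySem

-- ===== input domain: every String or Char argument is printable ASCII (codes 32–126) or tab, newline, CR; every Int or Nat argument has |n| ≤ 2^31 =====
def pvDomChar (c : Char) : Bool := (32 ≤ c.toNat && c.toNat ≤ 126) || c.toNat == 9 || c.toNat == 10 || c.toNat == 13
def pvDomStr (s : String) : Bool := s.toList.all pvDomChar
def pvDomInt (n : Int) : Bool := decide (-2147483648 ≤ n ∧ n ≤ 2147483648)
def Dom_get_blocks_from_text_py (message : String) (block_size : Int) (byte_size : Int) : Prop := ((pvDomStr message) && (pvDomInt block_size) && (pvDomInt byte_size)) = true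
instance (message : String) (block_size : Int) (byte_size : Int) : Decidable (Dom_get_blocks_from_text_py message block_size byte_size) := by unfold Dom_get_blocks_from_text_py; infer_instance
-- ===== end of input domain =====

-- B replaces A's per-byte exponentiation byte_size ** (i % block_size) with a memoryview
-- while-loop that slices off one chunk at a time and evaluates it by divide and conquer
-- (split in half, combine with one power); objective: faster (measured).

-- ===== PORT A =====
def get_blocks_from_text_py (message : String) (block_size : Int) (byte_size : Int) : List Int :=
  let bytes : List Int := message.toList.map (fun c => (c.toNat : Int))
  (PySem.List.pyRange 0 (bytes.length : Int) block_size).foldl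
    (fun block_ints block_s =>
      block_ints ++
        [(PySem.List.pyRange block_s (min (block_s + block_size) (bytes.length : Int)) 1).foldl
          (fun block_int i =>
            block_int + PySem.List.pyGetD bytes i 0 * byte_size ^ (PySem.Int.mod i block_size).toNat)
          0])
    []

-- ===== PORT B =====
-- _block_val: value of chunk as little-endian digits in base byte_size, by divide and conquer
def pvBlockVal (byte_size : Int) (chunk : List Int) : Int :=
  if chunk.length = 0 then 0
  else if chunk.length = 1 then chunk.headD 0
  else
    pvBlockVal byte_size (chunk.take (chunk.length / 2)) +
      byte_size ^ (chunk.length / 2) * pvBlockVal byte_size (chunk.drop (chunk.length / 2))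
  termination_by chunk.length
  decreasing_by
  · simp; omega
  · simp; omega

-- the 'while data:' loop of Source B; 'rest.drop (bs - 1)' is data[block_size:] for the bs ≥ 1
-- the caller guarantees (written this way only so the recursion is structurally decreasing)
def pvBlocksLoop (byte_size : Int) (bs : Nat) : List Int → List Int
  | [] => []
  | a :: rest =>
      pvBlockVal byte_size ((a :: rest).take bs) :: pvBlocksLoop byte_size bs (rest.drop (bs - 1))
  termination_by data => data.length
  decreasing_by simp

def get_blocks_from_text_py_alt (message : String) (block_size : Int) (byte_size : Int) : List Int :=
  let data : List Int := message.toList.map (fun c => (c.toNat : Int))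
  if block_size ≤ 0 then []
  else pvBlocksLoop byte_size block_size.toNat data

-- ===== PRECONDITION & SPEC =====
-- Pre_ excludes only block_size = 0, where A raises ValueError (range() arg 3 must not be zero).
def Pre_get_blocks_from_text_py (message : String) (block_size : Int) (byte_size : Int) : Prop :=
  block_size ≠ 0
instance (message : String) (block_size : Int) (byte_size : Int) : Decidable (Pre_get_blocks_from_text_py message block_size byte_size) := by unfold Pre_get_blocks_from_text_py; infer_instance

def pvWitness_get_blocks_from_text_py : String × Int × Int := ("Hi!", 2, 256)

def Spec_get_blocks_from_text_py (message : String) (block_size : Int) (byte_size : Int) (out : List Int) : Prop := out = get_blocks_from_text_py_alt message block_size byte_size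
instance (message : String) (block_size : Int) (byte_size : Int) (out : List Int) : Decidable (Spec_get_blocks_from_text_py message block_size byte_size out) := by unfold Spec_get_blocks_from_text_py; infer_instance

-- ===== CLAIM (what is proved, stated in full; the proofs are below) =====
def Claim_equal_get_blocks_from_text_py : Prop := ∀ (message : String) (block_size : Int) (byte_size : Int), Dom_get_blocks_from_text_py message block_size byte_size → Pre_get_blocks_from_text_py message block_size byte_size → Spec_get_blocks_from_text_py message block_size byte_size (get_blocks_from_text_py message block_size byte_size)


-- ===== LEMMAS AND PROOFS =====

theorem pvTakeMin (xs : List Int) (m : Nat) : xs.take (min m xs.length) = xs.take m := by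
  rw [List.take_eq_take_iff]
  omega

-- value of a block as a base-byte_size positional sum, from the front
def pvS (B : Int) : List Int → Int
  | [] => 0
  | a :: t => a + B * pvS B t

theorem pvS_append (B : Int) (c : List Int) (a : Int) :
    pvS B (c ++ [a]) = pvS B c + a * B ^ c.length := by
  induction c with
  | nil => simp [pvS]
  | cons x t ih => simp [pvS, ih]; ring

theorem pvS_split (B : Int) (c₁ c₂ : List Int) :
    pvS B (c₁ ++ c₂) = pvS B c₁ + B ^ c₁.length * pvS B c₂ := by
  induction c₁ with
  | nil => simp [pvS]
  | cons x t ih => simp [pvS, ih]; ring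

theorem pvBlockVal_le_eq (B : Int) : ∀ (n : Nat) (c : List Int), c.length ≤ n →
    pvBlockVal B c = pvS B c := by
  intro n
  induction n with
  | zero =>
      intro c hc
      have : c = [] := List.length_eq_zero_iff.mp (by omega)
      subst this
      simp [pvBlockVal, pvS]
  | succ n ih =>
      intro c hc
      unfold pvBlockVal
      by_cases h0 : c.length = 0
      · have : c = [] := List.length_eq_zero_iff.mp h0
        subst this
        simp [pvS]
      · by_cases h1 : c.length = 1
        · obtain ⟨a, ha⟩ : ∃ a, c = [a] := List.length_eq_one_iff.mp h1
          subst ha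
          simp [pvS]
        · rw [if_neg h0, if_neg h1]
          have hmid1 : 1 ≤ c.length / 2 := by omega
          have hmid2 : c.length / 2 < c.length := by omega
          rw [ih (c.take (c.length / 2)) (by simp; omega),
            ih (c.drop (c.length / 2)) (by simp; omega)]
          have := pvS_split B (c.take (c.length / 2)) (c.drop (c.length / 2))
          rw [List.take_append_drop] at this
          rw [this, List.length_take, Nat.min_eq_left (Nat.le_of_lt hmid2)]

theorem pvBlockVal_eq (B : Int) (c : List Int) : pvBlockVal B c = pvS B c :=
  pvBlockVal_le_eq B c.length c le_rfl

theorem pvRange_pos_nil (a b s : Int) (hs : 0 < s) (hab : b ≤ a) :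
    PySem.List.pyRange a b s = [] := by
  simp [PySem.List.pyRange, show ¬ s = 0 by omega, hs, show ¬ a < b by omega]

theorem pvRange_neg_nil (a b s : Int) (hs : s < 0) (hab : a ≤ b) :
    PySem.List.pyRange a b s = [] := by
  simp [PySem.List.pyRange, show ¬ s = 0 by omega, show ¬ 0 < s by omega,
    show ¬ b < a by omega]

theorem pvRange_pos_cons (a b s : Int) (hs : 0 < s) (hab : a < b) :
    PySem.List.pyRange a b s = a :: PySem.List.pyRange (a + s) b s := by
  have hs0 : s ≠ 0 := by omega
  have h1 : b - a + s - 1 = (b - a - 1) + 1 * s := by ring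
  have h2 : (b - a + s - 1) / s = (b - a - 1) / s + 1 := by
    rw [h1, Int.add_mul_ediv_right _ _ hs0]
  have h3 : 0 ≤ (b - a - 1) / s := Int.ediv_nonneg (by omega) (by omega)
  rw [PySem.List.pyRange_of_pos _ _ hs, PySem.List.pyRange_of_pos _ _ hs]
  rw [if_pos hab]
  have h4 : ((b - a + s - 1) / s).toNat = ((b - a - 1) / s).toNat + 1 := by omega
  rw [h4, List.range_succ_eq_map]
  by_cases hc : a + s < b
  · rw [if_pos hc]
    have h5 : b - (a + s) + s - 1 = b - a - 1 := by ring
    rw [h5]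
    simp only [List.map_cons, List.map_map, Nat.cast_zero, mul_zero, add_zero]
    refine congrArg _ ?_
    apply List.map_congr_left
    intro k _
    simp [Function.comp]
    push_cast
    ring
  · rw [if_neg hc]
    have h6 : (b - a - 1) / s = 0 := Int.ediv_eq_zero_of_lt (by omega) (by omega)
    simp [h6]

theorem pvInnerSum (bytes : List Int) (B bs : Int) (hbs : 0 < bs) (s : Int)
    (hs : 0 ≤ s) (hdvd : bs ∣ s) :
    ∀ L : Nat, (L : Int) ≤ min bs ((bytes.length : Int) - s) →
      (List.range L).foldl
        (fun (acc : Int) (k : Nat) => acc + PySem.List.pyGetD bytes (s + (k : Int)) 0 *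
          B ^ (PySem.Int.mod (s + (k : Int)) bs).toNat) 0
        = pvS B ((bytes.drop s.toNat).take L) := by
  intro L
  induction L with
  | zero => intro _; simp [pvS]
  | succ L ih =>
      intro hL
      have hL' : (L : Int) ≤ min bs ((bytes.length : Int) - s) := by push_cast at hL ⊢; omega
      have hLbs : (L : Int) < bs := by omega
      have hLlen : s + (L : Int) < (bytes.length : Int) := by omega
      rw [List.range_succ, List.foldl_append, ih hL']
      obtain ⟨q, hq⟩ := hdvd
      -- the exponent: (s + L) % bs = L
      have hmod : PySem.Int.mod (s + (L : Int)) bs = L := by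
        rw [PySem.Int.mod_eq_emod_of_pos hbs, hq]
        rw [show bs * q + (L : Int) = (L : Int) + bs * q by ring]
        rw [Int.add_mul_emod_self_left]
        exact Int.emod_eq_of_lt (by omega) hLbs
      -- the byte: bytes[s + L]
      have hidx : s + (L : Int) = ((s.toNat + L : Nat) : Int) := by omega
      have hlt : s.toNat + L < bytes.length := by omega
      have hgd : PySem.List.pyGetD bytes (s + (L : Int)) 0 = bytes[s.toNat + L]'hlt := by
        rw [hidx, PySem.List.pyGetD_natCast, List.getD_eq_getElem _ _ hlt]
      -- the chunk: take (L+1) = take L ++ [bytes[s.toNat + L]]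
      have hLd : L < (bytes.drop s.toNat).length := by
        rw [List.length_drop]; omega
      have htake : (bytes.drop s.toNat).take (L + 1)
          = (bytes.drop s.toNat).take L ++ [(bytes.drop s.toNat)[L]'hLd] := by
        rw [List.take_succ, List.getElem?_eq_getElem hLd]
        rfl
      have hget : (bytes.drop s.toNat)[L]'hLd = bytes[s.toNat + L]'hlt := by
        rw [List.getElem_drop]
      have hlen : ((bytes.drop s.toNat).take L).length = L := by
        rw [List.length_take, List.length_drop]; omega
      rw [htake, pvS_append, hget, hlen]
      simp only [List.foldl_cons, List.foldl_nil, hmod, hgd]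
      simp

theorem pvOuter (bytes : List Int) (B bs : Int) (hbs : 0 < bs) :
    ∀ q : Nat,
      (PySem.List.pyRange (bs * q) (bytes.length : Int) bs).map
        (fun block_s =>
          (PySem.List.pyRange block_s (min (block_s + bs) (bytes.length : Int)) 1).foldl
            (fun block_int i =>
              block_int + PySem.List.pyGetD bytes i 0 * B ^ (PySem.Int.mod i bs).toNat) 0)
        = pvBlocksLoop B bs.toNat (bytes.drop (bs.toNat * q)) := by
  have hbsN : 1 ≤ bs.toNat := by omega
  have key : ∀ (m q : Nat), bytes.length - bs.toNat * q ≤ m →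
      (PySem.List.pyRange (bs * q) (bytes.length : Int) bs).map
        (fun block_s =>
          (PySem.List.pyRange block_s (min (block_s + bs) (bytes.length : Int)) 1).foldl
            (fun block_int i =>
              block_int + PySem.List.pyGetD bytes i 0 * B ^ (PySem.Int.mod i bs).toNat) 0)
        = pvBlocksLoop B bs.toNat (bytes.drop (bs.toNat * q)) := by
    intro m
    induction m with
    | zero =>
        intro q hq
        have hcast : bs * (q : Int) = ((bs.toNat * q : Nat) : Int) := by
          push_cast
          rw [Int.toNat_of_nonneg (le_of_lt hbs)]
        have hle : (bytes.length : Int) ≤ bs * q := by omega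
        rw [pvRange_pos_nil _ _ _ hbs hle, List.drop_eq_nil_of_le (by omega)]
        simp [pvBlocksLoop]
    | succ m ih =>
        intro q hq
        have hcast : bs * (q : Int) = ((bs.toNat * q : Nat) : Int) := by
          push_cast
          rw [Int.toNat_of_nonneg (le_of_lt hbs)]
        by_cases hle : (bytes.length : Int) ≤ bs * q
        · rw [pvRange_pos_nil _ _ _ hbs hle, List.drop_eq_nil_of_le (by omega)]
          simp [pvBlocksLoop]
        · have hlt : bs * (q : Int) < (bytes.length : Int) := by omega
          have hltN : bs.toNat * q < bytes.length := by omega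
          rw [pvRange_pos_cons _ _ _ hbs hlt, List.map_cons]
          -- the head block
          have hsnat : (bs * (q : Int)).toNat = bs.toNat * q := by omega
          have hdlen : (bytes.drop (bs.toNat * q)).length = bytes.length - bs.toNat * q := by
            rw [List.length_drop]
          set K : Nat := (min (bs * (q : Int) + bs) (bytes.length : Int) - bs * (q : Int)).toNat with hK
          have hKle : (K : Int) ≤ min bs ((bytes.length : Int) - bs * (q : Int)) := by omega
          have hhead :
              (PySem.List.pyRange (bs * (q : Int)) (min (bs * (q : Int) + bs) (bytes.length : Int)) 1).foldl
                (fun block_int i =>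
                  block_int + PySem.List.pyGetD bytes i 0 * B ^ (PySem.Int.mod i bs).toNat) 0
              = pvS B ((bytes.drop (bs.toNat * q)).take bs.toNat) := by
            rw [PySem.List.pyRange_one, List.foldl_map, ← hK]
            rw [pvInnerSum bytes B bs hbs (bs * (q : Int)) (by positivity) ⟨q, rfl⟩ K hKle]
            rw [hsnat]
            have hKmin : K = min bs.toNat (bytes.drop (bs.toNat * q)).length := by
              rw [hdlen]; omega
            rw [hKmin, pvTakeMin]
          -- the tail
          have hdist : bs.toNat * (q + 1) = bs.toNat * q + bs.toNat := by ring
          have htail1 : bs * (q : Int) + bs = bs * ((q + 1 : Nat) : Int) := by push_cast; ring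
          obtain ⟨a, rest, hdata⟩ : ∃ a rest, bytes.drop (bs.toNat * q) = a :: rest := by
            cases hd : bytes.drop (bs.toNat * q) with
            | nil => exfalso; have := congrArg List.length hd; simp [hdlen] at this; omega
            | cons a rest => exact ⟨a, rest, rfl⟩
          have hdrop : rest.drop (bs.toNat - 1) = bytes.drop (bs.toNat * (q + 1)) := by
            have h1 : rest.drop (bs.toNat - 1) = (a :: rest).drop bs.toNat := by
              obtain ⟨n, hn⟩ : ∃ n, bs.toNat = n + 1 := ⟨bs.toNat - 1, by omega⟩
              rw [hn]; simp
            rw [h1, ← hdata, List.drop_drop, hdist, Nat.add_comm]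
          rw [hhead, hdata, pvBlocksLoop, ← hdata, hdrop, htail1]
          rw [ih (q + 1) (by omega)]
          rw [hdata, pvBlockVal_eq]
  intro q
  exact key bytes.length q (by omega)

-- ===== VERDICT (by name: the statement is the Claim_ definition above) =====
theorem get_blocks_from_text_py_spec : Claim_equal_get_blocks_from_text_py := by
  intro message block_size byte_size _ hpre
  have hpre' : block_size ≠ 0 := hpre
  unfold Spec_get_blocks_from_text_py
  dsimp only [get_blocks_from_text_py, get_blocks_from_text_py_alt]
  rcases lt_or_gt_of_ne hpre' with hneg | hpos
  · rw [pvRange_neg_nil _ _ _ hneg (by positivity)]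
    simp [show block_size ≤ 0 by omega]
  · rw [if_neg (by omega)]
    rw [PySem.List.foldl_append_singleton_eq_map, List.nil_append]
    have h := pvOuter (message.toList.map (fun c => (c.toNat : Int))) byte_size block_size hpos 0
    rw [show ((0:Nat):Int) = (0:Int) from rfl, mul_zero, Nat.mul_zero, List.drop_zero] at h
    exact h
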